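-- pv_equiv track=rewrite | github.com/FM-uib/INF368 | compare_generators_Ex1/TFrecords_generator/TFrecords_generator_simple_NN.py | get_first_word_in_string
-- ===== SOURCE A (Python) =====
-- def is_blank_char(c):
-- 	switcher = {' ': 1,
-- 				'\t': 1,
-- 				'\n': 1,
-- 				'\r': 1,
-- 				'\f': 1,
-- 				'\v': 1,
-- 				'\a': 1,
-- 				'\b': 1}
-- 	default_non_blank_char = 0
-- 	return switcher.get(c, default_non_blank_char)
--
-- def get_first_word_in_string(s):
-- 	begin_idx = 0
-- 	end_idx = 0
-- 	for idx, char in enumerate(s):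
-- 		if not is_blank_char(char):
-- 			begin_idx = idx
-- 			break
-- 	for idx, char in enumerate(s[begin_idx:],begin_idx):
-- 		if is_blank_char(char):
-- 			end_idx = idx
-- 			break
-- 	return s[begin_idx:end_idx], begin_idx, end_idx
-- ===== SOURCE B (Python) =====
-- BLANKS = set(' \t\n\r\f\v\a\b')
--
-- def get_first_word_in_string(s):
--     begin_idx = 0
--     end_idx = 0
--     found_begin = False
--     for idx, char in enumerate(s):
--         if not found_begin:
--             if char not in BLANKS:
--                 begin_idx = idx
--                 found_begin = True
--         elif char in BLANKS:
--             end_idx = idx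
--             break
--     return s[begin_idx:end_idx], begin_idx, end_idx
-- ===== Notes on version B (the rewrite author's own statement) =====
-- stated objective: faster
-- what changed: A scans the string twice (one loop finding the first non-blank index, then a second loop over the slice copy s[begin:] finding the following blank) and rebuilds a fresh 8-entry dict inside is_blank_char for every character; B makes a single left-to-right pass with a found_begin flag, testing blankness by membership in one precomputed set.
import Mathlib
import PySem

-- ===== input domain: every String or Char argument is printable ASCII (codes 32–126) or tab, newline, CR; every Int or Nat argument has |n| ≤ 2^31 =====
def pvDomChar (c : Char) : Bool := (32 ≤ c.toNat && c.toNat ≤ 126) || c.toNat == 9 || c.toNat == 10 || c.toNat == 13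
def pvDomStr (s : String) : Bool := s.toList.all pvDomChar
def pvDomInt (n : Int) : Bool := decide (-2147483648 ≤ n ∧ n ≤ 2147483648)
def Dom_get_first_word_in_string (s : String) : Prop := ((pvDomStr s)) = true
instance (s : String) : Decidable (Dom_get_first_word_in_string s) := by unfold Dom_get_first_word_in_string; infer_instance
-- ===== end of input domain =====

-- B replaces A's two sequential scans (find word start, then rescan from there for its end)
-- by ONE left-to-right pass with a found_begin flag; same return value; a timing run measured B faster by a constant factor (no per-char dict rebuild, no slice copy).

-- ===== PORT A =====
def is_blank_char (c : Char) : Int :=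
  let switcher : PySem.Dict Char Int := PySem.Dict.ofList
    [(' ', 1), ('\t', 1), ('\n', 1), ('\r', 1), ('\x0c', 1), ('\x0b', 1), ('\x07', 1), ('\x08', 1)]
  let default_non_blank_char : Int := 0
  PySem.Dict.getD switcher c default_non_blank_char

-- first for-loop of A: break at first char with `not is_blank_char(char)` (int truthiness: not v ↔ v = 0)
def pvFindBegin : List Char → Nat → Nat
  | [], _ => 0
  | c :: cs, idx => if is_blank_char c = 0 then idx else pvFindBegin cs (idx + 1)

-- second for-loop of A: over s[begin:] enumerated from begin, break at first blank char
def pvFindEnd : List Char → Nat → Nat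
  | [], _ => 0
  | c :: cs, idx => if is_blank_char c ≠ 0 then idx else pvFindEnd cs (idx + 1)

def get_first_word_in_string (s : String) : String × Int × Int :=
  let l := s.toList
  let begin_idx := pvFindBegin l 0
  -- s[begin_idx:] with 0 ≤ begin_idx is List.drop (= PySem.List.slice_from_natCast)
  let end_idx := pvFindEnd (l.drop begin_idx) begin_idx
  (String.ofList (PySem.List.slice l (some (begin_idx : Int)) (some (end_idx : Int))),
   (begin_idx : Int), (end_idx : Int))

-- ===== PORT B =====
def pvBlanks : PySem.Set Char := PySem.Set.ofList (" \t\n\r\x0c\x0b\x07\x08".toList)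

-- B's single pass: state (found_begin, begin_idx, end_idx); break at first blank after the word started
def pvScan : List Char → Nat → Bool → Nat → Nat → Nat × Nat
  | [], _, _, b, e => (b, e)
  | c :: cs, idx, found, b, e =>
    if found = false then
      if (pvBlanks.contains c) = false then pvScan cs (idx + 1) true idx e
      else pvScan cs (idx + 1) found b e
    else if pvBlanks.contains c then (b, idx)
    else pvScan cs (idx + 1) found b e

def get_first_word_in_string_alt (s : String) : String × Int × Int :=
  let l := s.toList
  let (b, e) := pvScan l 0 false 0 0
  (String.ofList (PySem.List.slice l (some (b : Int)) (some (e : Int))), (b : Int), (e : Int))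

-- ===== PRECONDITION & SPEC =====
def Spec_get_first_word_in_string (s : String) (out : String × Int × Int) : Prop := out = get_first_word_in_string_alt s
instance (s : String) (out : String × Int × Int) : Decidable (Spec_get_first_word_in_string s out) := by unfold Spec_get_first_word_in_string; infer_instance

-- ===== CLAIM (what is proved, stated in full; the proofs are below) =====
def Claim_equal_get_first_word_in_string : Prop := ∀ (s : String), Dom_get_first_word_in_string s → Spec_get_first_word_in_string s (get_first_word_in_string s)

-- ===== LEMMAS AND PROOFS =====

-- the two blank tests agree on every character
theorem blank_iff (c : Char) : c ∈ pvBlanks ↔ ¬ (is_blank_char c = 0) := by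
  simp [pvBlanks, is_blank_char, PySem.Dict.getD, PySem.Dict.ofList,
    PySem.Set.ofList, PySem.Dict.update, PySem.Dict.insert, PySem.Dict.get?, PySem.Dict.empty,
    PySem.Dict.contains, List.find?, beq_iff_eq]
  by_cases h1 : c = ' '; · simp [h1]
  by_cases h2 : c = '\t'; · simp [h2]
  by_cases h3 : c = '\n'; · simp [h3]
  by_cases h4 : c = '\x0d'; · simp [h4]
  by_cases h5 : c = '\x0c'; · simp [h5]
  by_cases h6 : c = '\x0b'; · simp [h6]
  by_cases h7 : c = '\x07'; · simp [h7]
  by_cases h8 : c = '\x08'; · simp [h8]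
  simp [beq_eq_false_iff_ne.mpr (Ne.symm h1), beq_eq_false_iff_ne.mpr (Ne.symm h2),
    beq_eq_false_iff_ne.mpr (Ne.symm h3), beq_eq_false_iff_ne.mpr (Ne.symm h4),
    beq_eq_false_iff_ne.mpr (Ne.symm h5), beq_eq_false_iff_ne.mpr (Ne.symm h6),
    beq_eq_false_iff_ne.mpr (Ne.symm h7), beq_eq_false_iff_ne.mpr (Ne.symm h8),
    h1, h2, h3, h4, h5, h6, h7, h8]

theorem scan_found (l : List Char) (i b : Nat) :
    pvScan l i true b 0 = (b, pvFindEnd l i) := by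
  induction l generalizing i with
  | nil => simp [pvScan, pvFindEnd]
  | cons c cs ih =>
    by_cases hb : is_blank_char c = 0
    · have hc : c ∉ pvBlanks := fun hm => (blank_iff c).mp hm hb
      simp [pvScan, pvFindEnd, hc, hb, ih]
    · have hc : c ∈ pvBlanks := (blank_iff c).mpr hb
      simp [pvScan, pvFindEnd, hc, hb]

theorem findBegin_cases (l : List Char) (j : Nat) (hj : 0 < j) :
    (pvFindBegin l j = 0 ∧ ∀ c ∈ l, ¬ (is_blank_char c = 0)) ∨ j ≤ pvFindBegin l j := by
  induction l generalizing j with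
  | nil => left; exact ⟨rfl, by simp⟩
  | cons c cs ih =>
    by_cases hb : is_blank_char c = 0
    · right; simp [pvFindBegin, hb]
    · rcases ih (j + 1) (by omega) with ⟨h0, hall⟩ | hle
      · left
        refine ⟨by simp [pvFindBegin, hb, h0], ?_⟩
        intro d hd
        rcases List.mem_cons.mp hd with rfl | hd
        · exact hb
        · exact hall d hd
      · right; simp [pvFindBegin, hb]; omega

theorem findEnd_all_blank (l : List Char) (h : ∀ c ∈ l, ¬ (is_blank_char c = 0)) :
    pvFindEnd l 0 = 0 := by
  cases l with
  | nil => simp [pvFindEnd]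
  | cons c cs => simp [pvFindEnd, h c (List.mem_cons_self)]

theorem scan_notfound (l : List Char) (i : Nat) :
    pvScan l i false 0 0 = (pvFindBegin l i, pvFindEnd (l.drop (pvFindBegin l i - i)) (pvFindBegin l i)) := by
  induction l generalizing i with
  | nil => simp [pvScan, pvFindBegin, pvFindEnd]
  | cons c cs ih =>
    by_cases hb : is_blank_char c = 0
    · have hc : c ∉ pvBlanks := fun hm => (blank_iff c).mp hm hb
      rw [show pvScan (c :: cs) i false 0 0 = pvScan cs (i + 1) true i 0 by simp [pvScan, hc],
        scan_found]
      simp [pvFindBegin, pvFindEnd, hb]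
    · have hc : c ∈ pvBlanks := (blank_iff c).mpr hb
      rw [show pvScan (c :: cs) i false 0 0 = pvScan cs (i + 1) false 0 0 by simp [pvScan, hc],
        ih (i + 1), show pvFindBegin (c :: cs) i = pvFindBegin cs (i + 1) by simp [pvFindBegin, hb]]
      rcases findBegin_cases cs (i + 1) (by omega) with ⟨h0, hall⟩ | hle
      · rw [h0]
        simp [findEnd_all_blank cs hall, pvFindEnd, hb]
      · have hs : pvFindBegin cs (i + 1) - i = (pvFindBegin cs (i + 1) - (i + 1)) + 1 := by omega
        rw [hs]
        simp [List.drop]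

-- ===== VERDICT (by name: the statement is the Claim_ definition above) =====
theorem get_first_word_in_string_spec : Claim_equal_get_first_word_in_string := by
  intro s _
  unfold Spec_get_first_word_in_string get_first_word_in_string get_first_word_in_string_alt
  simp only [scan_notfound]
  simp
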